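-- pv_equiv track=rewrite | github.com/whatasame/BaekjoonHub | 백준/Silver/5883. 아이폰 9S/아이폰 9S.py | solution
-- ===== SOURCE A (Python) =====
-- from collections import defaultdict
--
-- def solution(numbers):
--     def longest_section(exclude):
--         counts = defaultdict(int)
--
--         bef = None
--         count = 0
--         for number in numbers:
--             if number == exclude:
--                 continue
--
--             if number == bef:
--                 count += 1
--             else:
--                 count = 1
--
--             counts[bef] = max(counts[bef], count)
--             bef = number
--
--         return max(counts.values())
--
--     return max([longest_section(number) for number in numbers])
-- ===== SOURCE B (Python) =====
-- def solution(numbers):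
--     # run-length encode once, then scan runs per distinct value (return value only)
--     runs = []
--     for x in numbers:
--         if runs and runs[-1][0] == x:
--             runs[-1] = (x, runs[-1][1] + 1)
--         else:
--             runs.append((x, 1))
--     seen = []
--     ans = None
--     for v, _ in runs:
--         if v in seen:
--             continue
--         seen.append(v)
--         prev = None
--         acc = 0
--         best = 0
--         for val, length in runs:
--             if val == v:
--                 continue
--             acc = acc + length if val == prev else length
--             prev = val
--             best = max(best, acc)
--         if ans is None or best > ans:
--             ans = best
--     return ans
-- ===== Notes on version B (the rewrite author's own statement) =====
-- stated objective: faster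
-- what changed: B run-length encodes the list once and, for each distinct value, scans the short run list merging runs separated by the excluded value, instead of A's per-element rescan of the whole list into a defaultdict of run counts.
import Mathlib
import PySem

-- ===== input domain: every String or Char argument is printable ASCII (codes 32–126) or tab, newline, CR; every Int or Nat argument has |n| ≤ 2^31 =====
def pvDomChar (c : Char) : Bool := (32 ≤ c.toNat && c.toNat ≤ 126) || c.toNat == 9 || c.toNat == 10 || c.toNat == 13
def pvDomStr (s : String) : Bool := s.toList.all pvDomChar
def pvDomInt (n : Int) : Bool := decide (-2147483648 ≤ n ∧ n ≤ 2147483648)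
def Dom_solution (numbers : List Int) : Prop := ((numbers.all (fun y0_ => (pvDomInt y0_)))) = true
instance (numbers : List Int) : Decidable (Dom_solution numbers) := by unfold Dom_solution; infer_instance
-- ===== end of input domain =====

-- B replaces A's per-element rescans with one run-length encoding scanned per distinct value (equivalent return value; alternative algorithm).

-- ===== PORT A =====
-- one iteration of A's inner loop: state = (counts, bef, count)
def dstep (exclude : Int) (st : PySem.Dict (Option Int) Int × Option Int × Int) (number : Int) :
    PySem.Dict (Option Int) Int × Option Int × Int :=
  if number == exclude then st
  else
    let count : Int := if (some number : Option Int) == st.2.1 then st.2.2 + 1 else 1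
    let counts := st.1.insert st.2.1 (max (st.1.getD st.2.1 0) count)
    (counts, some number, count)

-- A's longest_section(exclude); Python raises ValueError on an empty dict, Pre_ keeps that out (getD 0 is never the raising case under Pre_)
def longestSection (numbers : List Int) (exclude : Int) : Int :=
  ((PySem.List.max? ((numbers.foldl (dstep exclude) (PySem.Dict.empty, none, 0)).1.values) (fun y => y)).getD 0)

def solution (numbers : List Int) : Int :=
  ((PySem.List.max? (numbers.map (fun number => longestSection numbers number)) (fun y => y)).getD 0)

-- ===== PORT B =====
-- Source B appends at the end of `runs`; the port keeps the run list reversed while folding and reverses once at the end (same runs, same order)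
def rleStep (runs : List (Int × Int)) (x : Int) : List (Int × Int) :=
  match runs with
  | (v, c) :: t => if v == x then (x, c + 1) :: t else (x, 1) :: (v, c) :: t
  | [] => [(x, 1)]

def rle (numbers : List Int) : List (Int × Int) := (numbers.foldl rleStep []).reverse

-- one iteration of Source B's inner loop over runs: state = (prev, acc, best)
def rstep (v : Int) (st : Option Int × Int × Int) (r : Int × Int) : Option Int × Int × Int :=
  if r.1 == v then st
  else
    let acc : Int := if (some r.1 : Option Int) == st.1 then st.2.1 + r.2 else r.2
    (some r.1, acc, max st.2.2 acc)

def scanRuns (runs : List (Int × Int)) (v : Int) : Int :=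
  (runs.foldl (rstep v) (none, 0, 0)).2.2

-- one iteration of Source B's outer loop: state = (seen, ans)
def outStep (runs : List (Int × Int)) (st : List Int × Option Int) (r : Int × Int) :
    List Int × Option Int :=
  if st.1.contains r.1 then st
  else
    let best := scanRuns runs r.1
    (st.1 ++ [r.1],
      match st.2 with
      | none => some best
      | some a => if best > a then some best else some a)

-- Source B returns None on the empty list (outside Pre_); getD 0 is never that case under Pre_
def solution_alt (numbers : List Int) : Int :=
  let runs := rle numbers
  ((runs.foldl (outStep runs) ([], none)).2.getD 0)

-- ===== PRECONDITION & SPEC =====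
-- Pre_ excludes exactly the inputs on which A raises ValueError (max() of an empty sequence):
-- the empty list and lists whose elements are all equal.
def Pre_solution (numbers : List Int) : Prop := ∃ x ∈ numbers, ∃ y ∈ numbers, x ≠ y
instance (numbers : List Int) : Decidable (Pre_solution numbers) := by unfold Pre_solution; infer_instance

def pvWitness_solution : List Int := [0, 1]

def Spec_solution (numbers : List Int) (out : Int) : Prop := out = solution_alt numbers
instance (numbers : List Int) (out : Int) : Decidable (Spec_solution numbers out) := by unfold Spec_solution; infer_instance

-- ===== CLAIM (what is proved, stated in full; the proofs are below) =====
def Claim_equal_solution : Prop := ∀ (numbers : List Int), Dom_solution numbers → Pre_solution numbers → Spec_solution numbers (solution numbers)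

-- ===== LEMMAS AND PROOFS =====

-- proof-side: the dict-free element-level machine that both ports simulate
def sstep (v : Int) (t : Option Int × Int × Int) (x : Int) : Option Int × Int × Int :=
  if x == v then t
  else
    let acc : Int := if (some x : Option Int) == t.1 then t.2.1 + 1 else 1
    (some x, acc, max t.2.2 acc)

def expandRuns (rs : List (Int × Int)) : List Int :=
  rs.flatMap (fun r => List.replicate r.2.toNat r.1)

def RunsWF (rs : List (Int × Int)) : Prop := ∀ r ∈ rs, (1 : Int) ≤ r.2

-- relation between A's dict state and the simple machine state
def RelAB (s : PySem.Dict (Option Int) Int × Option Int × Int) (t : Option Int × Int × Int) : Prop :=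
  s.2.1 = t.1 ∧ s.2.2 = t.2.1 ∧ s.1.keys.Nodup ∧ 0 ≤ t.2.1 ∧ 0 ≤ t.2.2 ∧
  (∀ w ∈ s.1.values, w ≤ t.2.2) ∧ (t.2.2 ∈ s.1.values ∨ (t.2.2 = 0 ∧ s.1.values = []))

theorem values_eq_items_map (d : PySem.Dict (Option Int) Int) :
    d.values = d.items.map (·.2) := rfl

theorem val_mem_values (d : PySem.Dict (Option Int) Int) (k : Option Int) (w : Int)
    (h : (k, w) ∈ d.items) : w ∈ d.values := by
  rw [values_eq_items_map]
  exact List.mem_map.2 ⟨(k, w), h, rfl⟩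

theorem getD_le_of_values_le (d : PySem.Dict (Option Int) Int) (k : Option Int) (b : Int)
    (hv : ∀ w ∈ d.values, w ≤ b) (hb : 0 ≤ b) : d.getD k 0 ≤ b := by
  rw [PySem.Dict.getD_eq_get?_getD]
  cases hg : d.get? k with
  | none => simpa using hb
  | some u =>
    have hmem : (k, u) ∈ d.items := PySem.Dict.mem_items_of_get?_eq_some d hg
    simpa using hv u (val_mem_values d k u hmem)

theorem relStep (v : Int) (s : PySem.Dict (Option Int) Int × Option Int × Int)
    (t : Option Int × Int × Int) (x : Int) (h : RelAB s t) :
    RelAB (dstep v s x) (sstep v t x) := by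
  obtain ⟨d, bef, cnt⟩ := s
  obtain ⟨p, a, b⟩ := t
  obtain ⟨h1, h2, hnd, ha, hb, hle, hmem⟩ := h
  dsimp only at h1 h2 hnd ha hb hle hmem
  subst h1 h2
  cases hxv : (x == v) with
  | true =>
    have hd : dstep v (d, bef, cnt) x = (d, bef, cnt) := by simp [dstep, hxv]
    have hs : sstep v (bef, cnt, b) x = (bef, cnt, b) := by simp [sstep, hxv]
    rw [hd, hs]
    exact ⟨rfl, rfl, hnd, ha, hb, hle, hmem⟩
  | false =>
    have hgd : d.getD bef 0 ≤ b := getD_le_of_values_le d bef b hle hb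
    have key : ∀ c' : Int, 1 ≤ c' →
        RelAB (d.insert bef (max (d.getD bef 0) c'), some x, c') (some x, c', max b c') := by
      intro c' hc1
      refine ⟨rfl, rfl, PySem.Dict.nodup_keys_insert d bef _ hnd, ?_, ?_, ?_, ?_⟩
      · dsimp only; omega
      · dsimp only; omega
      · intro w hw
        dsimp only at hw ⊢
        rcases PySem.Dict.mem_values_insert d bef _ w hw with hw1 | hw2
        · rw [hw1]; exact max_le_max hgd (le_refl c')
        · exact le_trans (hle w hw2) (le_max_left _ _)
      · left
        dsimp only
        rcases le_total b c' with hbc | hbc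
        · have hins : max (d.getD bef 0) c' = c' := max_eq_right (le_trans hgd hbc)
          rw [max_eq_right hbc, hins]
          exact val_mem_values _ bef c' (PySem.Dict.mem_items_insert_self d bef c')
        · rw [max_eq_left hbc]
          rcases hmem with hbv | ⟨hb0, _⟩
          · rw [values_eq_items_map] at hbv
            obtain ⟨⟨k', w'⟩, hpr, hpr2⟩ := List.mem_map.1 hbv
            dsimp only at hpr2
            subst hpr2
            by_cases hk : k' = bef
            · subst hk
              have hget : d.get? k' = some w' := PySem.Dict.get?_of_mem_items d hpr hnd
              have hgd' : d.getD k' 0 = w' := by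
                rw [PySem.Dict.getD_eq_get?_getD, hget]; rfl
              rw [hgd', max_eq_left hbc]
              exact val_mem_values _ k' w' (PySem.Dict.mem_items_insert_self d k' w')
            · have hm : (k', w') ∈ (d.insert bef (max (d.getD bef 0) c')).items :=
                (PySem.Dict.mem_items_insert d bef _ (k', w')).2 (Or.inr ⟨hpr, hk⟩)
              exact val_mem_values _ k' w' hm
          · omega
    have hd : dstep v (d, bef, cnt) x
        = (d.insert bef (max (d.getD bef 0)
            (if (some x : Option Int) == bef then cnt + 1 else 1)), some x,
            (if (some x : Option Int) == bef then cnt + 1 else 1)) := by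
      simp only [dstep, hxv, Bool.false_eq_true, if_false]
    have hs : sstep v (bef, cnt, b) x
        = (some x, (if (some x : Option Int) == bef then cnt + 1 else 1),
            max b (if (some x : Option Int) == bef then cnt + 1 else 1)) := by
      simp only [sstep, hxv, Bool.false_eq_true, if_false]
    rw [hd, hs]
    exact key _ (by split <;> omega)

theorem relFold (v : Int) (l : List Int) (s : PySem.Dict (Option Int) Int × Option Int × Int)
    (t : Option Int × Int × Int) (h : RelAB s t) :
    RelAB (l.foldl (dstep v) s) (l.foldl (sstep v) t) := by
  induction l generalizing s t with
  | nil => exact h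
  | cons x l ih => exact ih _ _ (relStep v s t x h)

theorem relExtract (s : PySem.Dict (Option Int) Int × Option Int × Int)
    (t : Option Int × Int × Int) (h : RelAB s t) :
    ((PySem.List.max? s.1.values (fun y => y)).getD 0) = t.2.2 := by
  obtain ⟨d, bef, cnt⟩ := s
  obtain ⟨p, a, b⟩ := t
  obtain ⟨_, _, _, _, _, hle, hmem⟩ := h
  dsimp only at hle hmem ⊢
  rcases hmem with hbv | ⟨hb0, hv⟩
  · cases hm : PySem.List.max? d.values (fun y => y) with
    | none =>
      rw [PySem.List.max?_eq_none_iff] at hm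
      rw [hm] at hbv
      cases hbv
    | some m =>
      have h1 : m ∈ d.values := PySem.List.max?_mem hm
      have h2 : b ≤ m := PySem.List.max?_isMax hm b hbv
      have h3 : m ≤ b := hle m h1
      simp [le_antisymm h3 h2]
  · rw [hv, (PySem.List.max?_eq_none_iff ([] : List Int) _).2 rfl]
    simp [hb0]

-- inner equality, element level
theorem inner_eq_sfold (numbers : List Int) (v : Int) :
    longestSection numbers v = (numbers.foldl (sstep v) (none, 0, 0)).2.2 := by
  have hinit : RelAB ((PySem.Dict.empty : PySem.Dict (Option Int) Int), none, 0)
      ((none : Option Int), 0, 0) := by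
    refine ⟨rfl, rfl, PySem.Dict.nodup_keys_empty, le_refl 0, le_refl 0, ?_, Or.inr ⟨rfl, rfl⟩⟩
    intro w hw
    exact absurd hw (List.not_mem_nil)
  exact relExtract _ _ (relFold v numbers _ _ hinit)

-- run-level lemmas
theorem sfold_replicate_same (v x : Int) (hx : (x == v) = false) (n : Nat) (a b : Int)
    (hab : a ≤ b) :
    List.foldl (sstep v) (some x, a, b) (List.replicate n x) = (some x, a + n, max b (a + n)) := by
  induction n generalizing a b with
  | zero => simp [max_eq_left hab]
  | succ n ih =>
    rw [List.replicate_succ, List.foldl_cons]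
    have hstep : sstep v (some x, a, b) x = (some x, a + 1, max b (a + 1)) := by
      simp [sstep, hx]
    rw [hstep, ih (a + 1) (max b (a + 1)) (le_max_right _ _)]
    refine Prod.ext rfl (Prod.ext ?_ ?_) <;> simp <;> omega

theorem sfold_run (v : Int) (t : Option Int × Int × Int) (x c : Int) (hx : (x == v) = false)
    (hc : 1 ≤ c) :
    List.foldl (sstep v) t (List.replicate c.toNat x) = rstep v t (x, c) := by
  obtain ⟨p, a, b⟩ := t
  have hcn : c.toNat = (c - 1).toNat + 1 := by omega
  rw [hcn, List.replicate_succ, List.foldl_cons]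
  cases hp : ((some x : Option Int) == p) with
  | true =>
    have hstep : sstep v (p, a, b) x = (some x, a + 1, max b (a + 1)) := by
      simp [sstep, hx, hp]
    rw [hstep, sfold_replicate_same v x hx _ _ _ (le_max_right _ _)]
    simp only [rstep, hx, hp, Bool.false_eq_true, if_false, if_true]
    refine Prod.ext rfl (Prod.ext ?_ ?_) <;> simp <;> omega
  | false =>
    have hstep : sstep v (p, a, b) x = (some x, 1, max b 1) := by
      simp [sstep, hx, hp]
    rw [hstep, sfold_replicate_same v x hx _ _ _ (le_max_right _ _)]
    simp only [rstep, hx, hp, Bool.false_eq_true, if_false]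
    refine Prod.ext rfl (Prod.ext ?_ ?_) <;> simp <;> omega

theorem sfold_skip (v : Int) (t : Option Int × Int × Int) (n : Nat) :
    List.foldl (sstep v) t (List.replicate n v) = t := by
  induction n with
  | zero => rfl
  | succ n ih => simpa [List.replicate_succ, sstep] using ih

theorem sfold_expand (v : Int) (rs : List (Int × Int)) (t : Option Int × Int × Int)
    (hwf : RunsWF rs) :
    List.foldl (sstep v) t (expandRuns rs) = List.foldl (rstep v) t rs := by
  induction rs generalizing t with
  | nil => rfl
  | cons r rs ih =>
    have hwf' : RunsWF rs := fun q hq => hwf q (List.mem_cons_of_mem _ hq)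
    have hr : (1 : Int) ≤ r.2 := hwf r (List.mem_cons_self)
    rw [expandRuns, List.flatMap_cons, ← expandRuns, List.foldl_append]
    cases hb : (r.1 == v) with
    | true =>
      have hrv : r.1 = v := eq_of_beq hb
      have hskip : List.foldl (sstep v) t (List.replicate r.2.toNat r.1) = t := by
        rw [hrv]; exact sfold_skip v t _
      have hrstep : rstep v t r = t := by simp [rstep, hb]
      rw [hskip, List.foldl_cons, hrstep, ih t hwf']
    | false =>
      rw [List.foldl_cons]
      have : rstep v t r = rstep v t (r.1, r.2) := by rfl
      rw [sfold_run v t r.1 r.2 hb hr, ← this, ih _ hwf']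

-- rle lemmas
theorem rleStep_wf (acc : List (Int × Int)) (x : Int) (h : RunsWF acc) : RunsWF (rleStep acc x) := by
  match acc with
  | [] =>
    intro r hr
    simp only [rleStep, List.mem_singleton] at hr
    rw [hr]
  | (v, c) :: t =>
    have hc : (1 : Int) ≤ c := h (v, c) (List.mem_cons_self)
    have ht : RunsWF t := fun q hq => h q (List.mem_cons_of_mem _ hq)
    intro r hr
    simp only [rleStep] at hr
    split at hr
    · rcases List.mem_cons.1 hr with h1 | h2
      · rw [h1]; show (1 : Int) ≤ c + 1; omega
      · exact ht r h2
    · rcases List.mem_cons.1 hr with h1 | h2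
      · rw [h1]
      · rcases List.mem_cons.1 h2 with h3 | h4
        · rw [h3]; exact hc
        · exact ht r h4

theorem rleFoldl_wf (l : List Int) (acc : List (Int × Int)) (h : RunsWF acc) :
    RunsWF (l.foldl rleStep acc) := by
  induction l generalizing acc with
  | nil => exact h
  | cons x l ih => exact ih _ (rleStep_wf acc x h)

theorem rle_wf (numbers : List Int) : RunsWF (rle numbers) := by
  intro r hr
  exact rleFoldl_wf numbers [] (by intro q hq; simp at hq) r (List.mem_reverse.1 hr)

theorem expand_append (u w : List (Int × Int)) :
    expandRuns (u ++ w) = expandRuns u ++ expandRuns w := by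
  simp [expandRuns]

theorem expand_rleStep (acc : List (Int × Int)) (x : Int) (h : RunsWF acc) :
    expandRuns (rleStep acc x).reverse = expandRuns acc.reverse ++ [x] := by
  match acc with
  | [] => simp [rleStep, expandRuns]
  | (v, c) :: t =>
    have hc : (1 : Int) ≤ c := h (v, c) (List.mem_cons_self)
    cases hb : (v == x) with
    | true =>
      have hvx : v = x := eq_of_beq hb
      have hstep : rleStep ((v, c) :: t) x = (x, c + 1) :: t := by
        simp [rleStep, hb]
      rw [hstep, List.reverse_cons, List.reverse_cons, expand_append, expand_append]
      have h1 : (c + 1).toNat = c.toNat + 1 := by omega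
      simp only [expandRuns, List.flatMap_cons, List.flatMap_nil, List.append_nil, h1,
        List.replicate_succ']
      simp [hvx]
    | false =>
      have hstep : rleStep ((v, c) :: t) x = (x, 1) :: (v, c) :: t := by
        simp [rleStep, hb]
      rw [hstep, List.reverse_cons, List.reverse_cons, expand_append, expand_append]
      simp [expandRuns]

theorem expand_foldl (l : List Int) (acc : List (Int × Int)) (h : RunsWF acc) :
    expandRuns (l.foldl rleStep acc).reverse = expandRuns acc.reverse ++ l := by
  induction l generalizing acc with
  | nil => simp
  | cons x l ih =>
    rw [List.foldl_cons, ih _ (rleStep_wf acc x h), expand_rleStep acc x h]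
    simp

theorem expand_rle (numbers : List Int) : expandRuns (rle numbers) = numbers := by
  simpa [expandRuns] using expand_foldl numbers [] (by intro r hr; simp at hr)

theorem mem_fst_expand (rs : List (Int × Int)) (hwf : RunsWF rs) (w : Int) :
    w ∈ rs.map Prod.fst ↔ w ∈ expandRuns rs := by
  induction rs with
  | nil => simp [expandRuns]
  | cons r rs ih =>
    have hr : (1 : Int) ≤ r.2 := hwf r (List.mem_cons_self)
    have hwf' : RunsWF rs := fun q hq => hwf q (List.mem_cons_of_mem _ hq)
    rw [expandRuns, List.flatMap_cons, ← expandRuns]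
    simp only [List.map_cons, List.mem_cons, List.mem_append, List.mem_replicate, ih hwf']
    constructor
    · rintro (h1 | h2)
      · exact Or.inl ⟨by omega, h1⟩
      · exact Or.inr h2
    · rintro (⟨_, h1⟩ | h2)
      · exact Or.inl h1
      · exact Or.inr h2

-- inner theorem
theorem inner_eq (numbers : List Int) (v : Int) :
    longestSection numbers v = scanRuns (rle numbers) v := by
  rw [inner_eq_sfold, scanRuns, ← sfold_expand v _ _ (rle_wf numbers), expand_rle]

-- outer loop invariant
theorem outer_fold (runs : List (Int × Int)) (rs : List (Int × Int)) (seen : List Int) (a : Int)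
    (h : ∀ w ∈ seen, scanRuns runs w ≤ a) :
    (rs.foldl (outStep runs) (seen, some a)).2
      = some (rs.foldl (fun m r => max m (scanRuns runs r.1)) a) := by
  induction rs generalizing seen a with
  | nil => rfl
  | cons r rs ih =>
    rw [List.foldl_cons, List.foldl_cons]
    cases hc : seen.contains r.1 with
    | true =>
      have hr : r.1 ∈ seen := List.contains_iff_mem.mp hc
      have h1 : outStep runs (seen, some a) r = (seen, some a) := by simp [outStep, hr]
      rw [h1, max_eq_left (h r.1 hr)]
      exact ih seen a h
    | false =>
      have h1 : outStep runs (seen, some a) r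
          = (seen ++ [r.1], some (max a (scanRuns runs r.1))) := by
        simp only [outStep, hc, Bool.false_eq_true, if_false]
        refine Prod.ext rfl ?_
        dsimp only
        split
        next hgt => rw [max_eq_right (le_of_lt hgt)]
        next hng => rw [max_eq_left (by omega)]
      rw [h1]
      apply ih
      intro w hw
      rcases List.mem_append.1 hw with h2 | h2
      · exact le_trans (h w h2) (le_max_left _ _)
      · rw [List.mem_singleton.1 h2]; exact le_max_right _ _

-- max over a list only depends on the set of values
theorem foldl_maxf_mem (f : Int → Int) (l : List Int) (i : Int) :
    l.foldl (fun m w => max m (f w)) i = i ∨ ∃ w ∈ l, l.foldl (fun m w => max m (f w)) i = f w := by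
  induction l generalizing i with
  | nil => left; rfl
  | cons x l ih =>
    rw [List.foldl_cons]
    rcases ih (max i (f x)) with h | ⟨w, hw, hfw⟩
    · rw [h]
      rcases max_choice i (f x) with h1 | h1
      · left; exact h1
      · right; exact ⟨x, List.mem_cons_self, h1⟩
    · right; exact ⟨w, List.mem_cons_of_mem _ hw, hfw⟩

theorem maxset_eq (f : Int → Int) (h : Int) (l1 l2 : List Int)
    (h12 : ∀ w ∈ l1, w = h ∨ w ∈ l2) (h21 : ∀ w ∈ l2, w = h ∨ w ∈ l1) :
    l1.foldl (fun m w => max m (f w)) (f h) = l2.foldl (fun m w => max m (f w)) (f h) := by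
  have key : ∀ (la lb : List Int), (∀ w ∈ la, w = h ∨ w ∈ lb) →
      la.foldl (fun m w => max m (f w)) (f h) ≤ lb.foldl (fun m w => max m (f w)) (f h) := by
    intro la lb hab
    rcases foldl_maxf_mem f la (f h) with he | ⟨w, hw, he⟩
    · rw [he]; exact (PySem.List.le_foldl_max_int lb f (f h)).1
    · rw [he]
      rcases hab w hw with hwh | hwb
      · rw [hwh]; exact (PySem.List.le_foldl_max_int lb f (f h)).1
      · exact (PySem.List.le_foldl_max_int lb f (f h)).2 w hwb
  exact le_antisymm (key l1 l2 h12) (key l2 l1 h21)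

-- ===== VERDICT (by name: the statement is the Claim_ definition above) =====
theorem solution_spec : Claim_equal_solution := by
  unfold Claim_equal_solution
  intro numbers _hdom hpre
  unfold Spec_solution
  obtain ⟨xx, hxx, yy, hyy, hne⟩ := hpre
  obtain ⟨h, t, rfl⟩ : ∃ h t, numbers = h :: t := by
    cases numbers with
    | nil => cases hxx
    | cons h t => exact ⟨h, t, rfl⟩
  have hwf := rle_wf (h :: t)
  have hexp := expand_rle (h :: t)
  obtain ⟨r0, rest, hcons⟩ : ∃ r0 rest, rle (h :: t) = r0 :: rest := by
    cases hr : rle (h :: t) with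
    | nil => rw [hr] at hexp; simp [expandRuns] at hexp
    | cons r0 rest => exact ⟨r0, rest, rfl⟩
  have hr02 : (1 : Int) ≤ r0.2 := hwf r0 (hcons ▸ List.mem_cons_self)
  have hr01 : r0.1 = h := by
    have hthis : expandRuns (r0 :: rest) = h :: t := by rw [← hcons]; exact hexp
    rw [expandRuns, List.flatMap_cons] at hthis
    have hn : r0.2.toNat = (r0.2.toNat - 1) + 1 := by omega
    rw [hn, List.replicate_succ, List.cons_append] at hthis
    injection hthis with h1 _
  have hmemruns : ∀ w, w ∈ (rle (h :: t)).map Prod.fst ↔ w ∈ h :: t := by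
    intro w; rw [mem_fst_expand _ hwf w, hexp]
  have hA : solution (h :: t)
      = (t.map (fun w => scanRuns (rle (h :: t)) w)).foldl max
          (scanRuns (rle (h :: t)) h) := by
    unfold solution
    have hmapeq : (h :: t).map (fun number => longestSection (h :: t) number)
        = (h :: t).map (fun w => scanRuns (rle (h :: t)) w) :=
      List.map_congr_left (fun w _ => inner_eq (h :: t) w)
    rw [hmapeq, List.map_cons, PySem.List.max?_id_cons]
    rfl
  have hB : solution_alt (h :: t)
      = (rest.map Prod.fst).foldl
          (fun m w => max m (scanRuns (rle (h :: t)) w)) (scanRuns (rle (h :: t)) h) := by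
    have hstep1 : outStep (r0 :: rest) ([], none) r0
        = ([r0.1], some (scanRuns (r0 :: rest) r0.1)) := by
      simp [outStep]
    unfold solution_alt
    rw [hcons]
    dsimp only
    rw [List.foldl_cons, hstep1, outer_fold (r0 :: rest) rest [r0.1] _
      (by intro w hw; rw [List.mem_singleton.1 hw])]
    rw [Option.getD_some, List.foldl_map, ← hcons, hr01]
  rw [hA, hB, List.foldl_map]
  apply maxset_eq (fun w => scanRuns (rle (h :: t)) w) h
  · intro w hw
    have hmem : w ∈ h :: t := List.mem_cons_of_mem _ hw
    rw [← hmemruns w, hcons, List.map_cons, hr01] at hmem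
    exact List.mem_cons.1 hmem
  · intro w hw
    have hmem : w ∈ (rle (h :: t)).map Prod.fst := by
      rw [hcons, List.map_cons]; exact List.mem_cons_of_mem _ hw
    rw [hmemruns w] at hmem
    exact List.mem_cons.1 hmem
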